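-- pv_equiv track=rewrite | github.com/mariahv9/Complex-Calculator | Experimentos.py | prod_intern_vec
-- ===== SOURCE A (Python) =====
-- def addition (c1, c2):
--      '''c1 + c2 ---> z
--      addition of tuples ---> tuple'''
--      a1 = c1 [0]; a2 = c2 [0]
--      b1 = c1 [1]; b2 = c2 [1]
--      x = a1 + a2
--      y = b1 + b2
--      z = (x, y)
--      return z
--
-- def product (c1, c2):
--      '''c1 * c2 ---> z
--      product of tuples ---> tuple'''
--      a1 = c1 [0]; a2 = c2 [0]
--      b1 = c1 [1]; b2 = c2 [1]
--      x = (a1 * a2) - (b1 * b2)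
--      y = (a1 * b2) + (a2 * b1)
--      z = (x, y)
--      return z
--
-- def prod_intern_vec (v1, v2):
--      '''vector, vector ---> tuple'''
--      if len (v1) != len (v2):
--           print ('Esta operacion no es posible por dimension de los vectores')
--      else:
--           prod = (0, 0)
--           for i in range (len (v1)):
--                prod = addition (prod, product(v1[i], v2 [i]))
--           return prod
-- ===== SOURCE B (Python) =====
-- def prod_intern_vec(v1, v2):
--     '''vector, vector ---> tuple'''
--     if len(v1) != len(v2):
--         print('Esta operacion no es posible por dimension de los vectores')
--         return None
--     return _dot(v1, v2, 0, len(v1))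
--
-- def _dot(v1, v2, lo, hi):
--     '''divide-and-conquer inner product over indices [lo, hi)'''
--     if lo == hi:
--         return (0, 0)
--     if hi - lo == 1:
--         (a, b) = v1[lo]
--         (c, d) = v2[lo]
--         return (a * c - b * d, a * d + c * b)
--     mid = (lo + hi) // 2
--     x1, y1 = _dot(v1, v2, lo, mid)
--     x2, y2 = _dot(v1, v2, mid, hi)
--     return (x1 + x2, y1 + y2)
-- ===== Notes on version B (the rewrite author's own statement) =====
-- stated objective: alternative
-- what changed: Replaces the left-to-right index loop threading a tuple accumulator through addition/product helpers by a divide-and-conquer recursion that splits the index range in half, computes each half's inner product recursively and adds the component pairs (correct because complex addition is associative and commutative).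
import Mathlib
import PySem

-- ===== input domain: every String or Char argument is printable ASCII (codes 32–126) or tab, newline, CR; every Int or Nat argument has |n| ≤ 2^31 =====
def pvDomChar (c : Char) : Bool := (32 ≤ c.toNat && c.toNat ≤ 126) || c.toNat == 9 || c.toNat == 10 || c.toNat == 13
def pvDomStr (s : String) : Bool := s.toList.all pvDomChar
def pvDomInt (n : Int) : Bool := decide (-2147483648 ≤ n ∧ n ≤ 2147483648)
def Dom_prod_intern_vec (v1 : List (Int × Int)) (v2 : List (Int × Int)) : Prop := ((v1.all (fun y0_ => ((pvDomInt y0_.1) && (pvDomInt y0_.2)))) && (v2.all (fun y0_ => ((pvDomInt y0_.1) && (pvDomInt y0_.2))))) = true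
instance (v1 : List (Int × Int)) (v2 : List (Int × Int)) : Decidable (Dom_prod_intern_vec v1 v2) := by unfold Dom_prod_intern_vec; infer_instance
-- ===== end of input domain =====

-- B replaces A's left-to-right accumulator loop by a divide-and-conquer recursion on
-- the index range (halve, recurse, add component pairs) — an alternative decomposition,
-- same cost. The Python `print` on length mismatch is a side effect not modelled here;
-- both versions return None (`none`) there.

-- ===== PORT A =====
-- helper `addition` from Source A
def pyAddition (c1 c2 : Int × Int) : Int × Int :=
  (c1.1 + c2.1, c1.2 + c2.2)

-- helper `product` from Source A
def pyProduct (c1 c2 : Int × Int) : Int × Int :=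
  (c1.1 * c2.1 - c1.2 * c2.2, c1.1 * c2.2 + c2.1 * c1.2)

-- the `for i in range(len(v1))` loop over a tuple accumulator; v1[i]/v2[i] are
-- always in range inside the else-branch, so getD's default is never used.
def prod_intern_vec (v1 : List (Int × Int)) (v2 : List (Int × Int)) : Option (Int × Int) :=
  if v1.length ≠ v2.length then
    none
  else
    some ((List.range v1.length).foldl
      (fun prod i => pyAddition prod (pyProduct (v1.getD i (0, 0)) (v2.getD i (0, 0))))
      (0, 0))

-- ===== PORT B =====
-- helper `_dot` from Source B: divide-and-conquer over indices [lo, hi); indices are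
-- always in range, so getD's default is never used.
def pyDot (v1 v2 : List (Int × Int)) (lo hi : Nat) : Int × Int :=
  -- Python's `lo == hi` guard, widened to `hi ≤ lo` purely for Nat termination;
  -- the two agree on every reachable call (always lo ≤ hi).
  if hi ≤ lo then (0, 0)
  else if hi - lo = 1 then
    let p := v1.getD lo (0, 0)
    let q := v2.getD lo (0, 0)
    (p.1 * q.1 - p.2 * q.2, p.1 * q.2 + q.1 * p.2)
  else
    let mid := (lo + hi) / 2
    let r1 := pyDot v1 v2 lo mid
    let r2 := pyDot v1 v2 mid hi
    (r1.1 + r2.1, r1.2 + r2.2)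
termination_by hi - lo
decreasing_by all_goals omega

def prod_intern_vec_alt (v1 : List (Int × Int)) (v2 : List (Int × Int)) : Option (Int × Int) :=
  if v1.length ≠ v2.length then
    none
  else
    some (pyDot v1 v2 0 v1.length)

-- ===== PRECONDITION & SPEC =====
def Spec_prod_intern_vec (v1 : List (Int × Int)) (v2 : List (Int × Int)) (out : Option (Int × Int)) : Prop := out = prod_intern_vec_alt v1 v2
instance (v1 : List (Int × Int)) (v2 : List (Int × Int)) (out : Option (Int × Int)) : Decidable (Spec_prod_intern_vec v1 v2 out) := by unfold Spec_prod_intern_vec; infer_instance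

-- ===== CLAIM (what is proved, stated in full; the proofs are below) =====
def Claim_equal_prod_intern_vec : Prop := ∀ (v1 : List (Int × Int)) (v2 : List (Int × Int)), Dom_prod_intern_vec v1 v2 → Spec_prod_intern_vec v1 v2 (prod_intern_vec v1 v2)

-- ===== LEMMAS AND PROOFS =====

-- component-wise sums over a list of indices
def dotSum (v1 v2 : List (Int × Int)) (l : List Nat) : Int × Int :=
  ((l.map (fun i => (v1.getD i (0, 0)).1 * (v2.getD i (0, 0)).1
                  - (v1.getD i (0, 0)).2 * (v2.getD i (0, 0)).2)).sum,
   (l.map (fun i => (v1.getD i (0, 0)).1 * (v2.getD i (0, 0)).2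
                  + (v2.getD i (0, 0)).1 * (v1.getD i (0, 0)).2)).sum)

-- A's foldl over any index list accumulates exactly the two component sums.
theorem foldl_dotSum (v1 v2 : List (Int × Int)) (l : List Nat) (init : Int × Int) :
    l.foldl (fun prod i => pyAddition prod (pyProduct (v1.getD i (0, 0)) (v2.getD i (0, 0)))) init
    = (init.1 + (dotSum v1 v2 l).1, init.2 + (dotSum v1 v2 l).2) := by
  induction l generalizing init with
  | nil => simp [dotSum]
  | cons i t ih =>
    simp only [List.foldl_cons, ih, dotSum, List.map_cons, List.sum_cons]
    simp [pyAddition, pyProduct]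
    constructor <;> ring

theorem dotSum_append (v1 v2 : List (Int × Int)) (l1 l2 : List Nat) :
    dotSum v1 v2 (l1 ++ l2)
    = ((dotSum v1 v2 l1).1 + (dotSum v1 v2 l2).1,
       (dotSum v1 v2 l1).2 + (dotSum v1 v2 l2).2) := by
  simp [dotSum]

-- B's divide-and-conquer computes the component sums over range' lo (hi - lo).
theorem pyDot_eq_dotSum (v1 v2 : List (Int × Int)) (lo hi : Nat) (h : lo ≤ hi) :
    pyDot v1 v2 lo hi = dotSum v1 v2 (List.range' lo (hi - lo)) := by
  by_cases h0 : hi ≤ lo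
  · have : lo = hi := le_antisymm h h0
    subst this
    rw [pyDot]; simp [dotSum]
  · by_cases h1 : hi - lo = 1
    · rw [pyDot]
      simp only [if_neg h0, if_pos h1]
      rw [h1]
      simp [dotSum, List.range']
    · rw [pyDot]
      simp only [if_neg h0, if_neg h1]
      have hlo : lo < (lo + hi) / 2 := by omega
      have hhi : (lo + hi) / 2 < hi := by omega
      rw [pyDot_eq_dotSum v1 v2 lo ((lo + hi) / 2) (by omega),
          pyDot_eq_dotSum v1 v2 ((lo + hi) / 2) hi (by omega)]
      have hsplit : List.range' lo (hi - lo)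
          = List.range' lo ((lo + hi) / 2 - lo) ++ List.range' ((lo + hi) / 2) (hi - (lo + hi) / 2) := by
        have h2 := List.range'_append_1 (s := lo) (m := (lo + hi) / 2 - lo)
          (n := hi - (lo + hi) / 2)
        rw [show lo + ((lo + hi) / 2 - lo) = (lo + hi) / 2 by omega] at h2
        rw [h2, show (lo + hi) / 2 - lo + (hi - (lo + hi) / 2) = hi - lo by omega]
      rw [hsplit, dotSum_append]
termination_by hi - lo
decreasing_by all_goals omega

-- ===== VERDICT (by name: the statement is the Claim_ definition above) =====
theorem prod_intern_vec_spec : Claim_equal_prod_intern_vec := by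
  intro v1 v2 _
  unfold Spec_prod_intern_vec prod_intern_vec prod_intern_vec_alt
  by_cases h : v1.length = v2.length
  · rw [if_neg (by simp [h]), if_neg (by simp [h])]
    rw [foldl_dotSum, pyDot_eq_dotSum v1 v2 0 v1.length (Nat.zero_le _)]
    simp [List.range_eq_range']
  · simp [h]
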